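-- pv_equiv track=rewrite | github.com/ECP-WarpX/picsar | utils/fortran_parsers/use_module_only.py | format_less_than_85_characters
-- ===== SOURCE A (Python) =====
-- def format_less_than_85_characters( line, indent ):
--     words = line.split(' ')
--     total_line = ''
--     new_line = indent
--     for word in words:
--         if len(new_line) + len(word) > 84:
--             n_spaces = 85 - len(new_line)
--             total_line += new_line + n_spaces*' ' + '&\n'
--             new_line = indent + '  '
--         new_line += word + ' '
--     total_line += new_line
--     return total_line.rstrip(' ')
-- ===== SOURCE B (Python) =====
-- def format_less_than_85_characters(line, indent):
--     # Pass 1: group the words into output lines, tracking only running lengths.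
--     groups = []
--     cur = []
--     cur_len = len(indent)
--     for word in line.split(' '):
--         if cur_len + len(word) > 84:
--             groups.append(cur)
--             cur = []
--             cur_len = len(indent) + 2
--         cur.append(word)
--         cur_len += len(word) + 1
--     groups.append(cur)
--     # Pass 2: render each group; every group but the last is padded to column 85
--     # and closed with a Fortran continuation '&'.
--     pieces = []
--     prefix = indent
--     for g in groups[:-1]:
--         body = prefix + ' '.join(g) + (' ' if g else '')
--         pieces.append(body + ' ' * (85 - len(body)) + '&\n')
--         prefix = indent + '  '
--     pieces.append(prefix + ' '.join(groups[-1]) + (' ' if groups[-1] else ''))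
--     return ''.join(pieces).rstrip(' ')
-- ===== Notes on version B (the rewrite author's own statement) =====
-- stated objective: alternative
-- what changed: A builds the output in one pass by mutating a (total_line, new_line) string pair; B first groups the words into line-groups tracking only running lengths, then a second pass renders each group with ' '.join, padding and '&\n'.
import Mathlib
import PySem

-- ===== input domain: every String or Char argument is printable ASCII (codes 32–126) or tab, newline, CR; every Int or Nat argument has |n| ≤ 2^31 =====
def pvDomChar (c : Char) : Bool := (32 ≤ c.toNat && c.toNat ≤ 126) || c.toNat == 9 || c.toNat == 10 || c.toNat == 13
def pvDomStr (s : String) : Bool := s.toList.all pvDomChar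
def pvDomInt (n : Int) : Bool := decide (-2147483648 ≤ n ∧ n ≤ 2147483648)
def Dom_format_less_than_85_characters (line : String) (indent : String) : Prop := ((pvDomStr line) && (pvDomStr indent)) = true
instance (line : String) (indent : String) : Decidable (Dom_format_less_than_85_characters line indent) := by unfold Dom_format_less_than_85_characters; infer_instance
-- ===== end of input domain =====

-- B replaces A's single loop over a (total_line, new_line) string pair by two passes:
-- first group the words into lines tracking only running lengths, then render the groups;
-- objective: alternative decomposition (same cost).


-- shared primitives both Pythons use:
-- Python's  n*' '  (negative n gives ''; Int.toNat clamps negatives to 0, exactly that)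
def pvSpaces (n : Int) : List Char := List.replicate n.toNat ' '
-- Python's  s.rstrip(' ')  — drop trailing ' ' only (exact: rstrip with an explicit char set)
def pvRstripSp (cs : List Char) : List Char := (cs.reverse.dropWhile (· == ' ')).reverse

-- ===== PORT A =====
-- A's loop state: (total_line, new_line); the final 'total_line += new_line' is the [] case.
def fmtA_loop (ind : List Char) : List (List Char) → List Char → List Char → List Char
  | [], total, newL => total ++ newL
  | w :: ws, total, newL =>
    if 84 < newL.length + w.length then
      fmtA_loop ind ws (total ++ newL ++ pvSpaces (85 - (newL.length : Int)) ++ ['&', '\n'])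
        ((ind ++ [' ', ' ']) ++ w ++ [' '])
    else
      fmtA_loop ind ws total (newL ++ w ++ [' '])

def format_less_than_85_characters (line : String) (indent : String) : String :=
  String.mk (pvRstripSp
    (fmtA_loop indent.toList (PySem.Chars.splitOn line.toList [' ']) [] indent.toList))

-- ===== PORT B =====
-- pass 1: groups of words; on overflow close the current group and restart at len(indent)+2
def fmtB_build (ind : List Char) : List (List Char) → Nat → List (List Char) → List (List (List Char))
  | [], _, cur => [cur]
  | w :: ws, curLen, cur =>
    if 84 < curLen + w.length then
      cur :: fmtB_build ind ws (ind.length + 2 + w.length + 1) [w]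
    else
      fmtB_build ind ws (curLen + w.length + 1) (cur ++ [w])

-- ' '.join(g) + (' ' if g else '')
def fmtB_body (g : List (List Char)) : List Char :=
  PySem.Chars.join [' '] g ++ (if g = [] then [] else [' '])

-- pass 2: every group but the last is padded to column 85 and closed with '&\n'
def fmtB_render (ind : List Char) : List Char → List (List (List Char)) → List Char
  | _, [] => []
  | pref, [g] => pref ++ fmtB_body g
  | pref, g :: g' :: gs =>
    let body := pref ++ fmtB_body g
    body ++ pvSpaces (85 - (body.length : Int)) ++ ['&', '\n'] ++
      fmtB_render ind (ind ++ [' ', ' ']) (g' :: gs)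

def format_less_than_85_characters_alt (line : String) (indent : String) : String :=
  String.mk (pvRstripSp
    (fmtB_render indent.toList indent.toList
      (fmtB_build indent.toList (PySem.Chars.splitOn line.toList [' ']) indent.toList.length [])))

-- ===== PRECONDITION & SPEC =====
def Spec_format_less_than_85_characters (line : String) (indent : String) (out : String) : Prop := out = format_less_than_85_characters_alt line indent
instance (line : String) (indent : String) (out : String) : Decidable (Spec_format_less_than_85_characters line indent out) := by unfold Spec_format_less_than_85_characters; infer_instance

-- ===== CLAIM (what is proved, stated in full; the proofs are below) =====
def Claim_equal_format_less_than_85_characters : Prop := ∀ (line : String) (indent : String), Dom_format_less_than_85_characters line indent → Spec_format_less_than_85_characters line indent (format_less_than_85_characters line indent)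

-- ===== LEMMAS AND PROOFS =====

lemma fmtB_body_append_singleton (g : List (List Char)) (w : List Char) :
    fmtB_body (g ++ [w]) = fmtB_body g ++ w ++ [' '] := by
  induction g with
  | nil => simp [fmtB_body, PySem.Chars.join_singleton, PySem.Chars.join_nil]
  | cons a g ih =>
    cases g with
    | nil =>
      simp [fmtB_body, PySem.Chars.join_cons_cons, PySem.Chars.join_singleton]
    | cons b g =>
      simp only [fmtB_body, List.cons_append, PySem.Chars.join_cons_cons] at ih ⊢
      simp_all

lemma fmtB_body_singleton (w : List Char) : fmtB_body [w] = w ++ [' '] := by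
  simp [fmtB_body, PySem.Chars.join_singleton]

lemma fmtB_build_ne_nil (ind : List Char) (ws : List (List Char)) (n : Nat)
    (cur : List (List Char)) : fmtB_build ind ws n cur ≠ [] := by
  induction ws generalizing n cur with
  | nil => simp [fmtB_build]
  | cons w ws ih =>
    simp only [fmtB_build]
    split
    · simp
    · exact ih _ _

lemma fmtAB_main (ind : List Char) (ws : List (List Char)) :
    ∀ (cur : List (List Char)) (total pref : List Char),
    fmtA_loop ind ws total (pref ++ fmtB_body cur)
      = total ++ fmtB_render ind pref (fmtB_build ind ws (pref.length + (fmtB_body cur).length) cur) := by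
  induction ws with
  | nil => intro cur total pref; simp [fmtA_loop, fmtB_build, fmtB_render]
  | cons w ws ih =>
    intro cur total pref
    simp only [fmtA_loop, fmtB_build, List.length_append]
    by_cases h : 84 < pref.length + (fmtB_body cur).length + w.length
    · rw [if_pos h, if_pos h]
      have hres : (ind ++ [' ', ' ']) ++ w ++ [' '] = (ind ++ [' ', ' ']) ++ fmtB_body [w] := by
        simp [fmtB_body_singleton]
      rw [hres]
      have := ih [w] (total ++ (pref ++ fmtB_body cur) ++
          pvSpaces (85 - ((pref.length + (fmtB_body cur).length : Nat) : Int)) ++ ['&', '\n'])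
          (ind ++ [' ', ' '])
      rw [this]
      have hlen : (ind ++ [' ', ' ']).length + (fmtB_body [w]).length
          = ind.length + 2 + w.length + 1 := by
        simp [fmtB_body_singleton]; omega
      rw [hlen]
      obtain ⟨g', gs', hgs⟩ := List.exists_cons_of_ne_nil
        (fmtB_build_ne_nil ind ws (ind.length + 2 + w.length + 1) [w])
      rw [hgs]
      simp [fmtB_render, List.length_append]
    · rw [if_neg h, if_neg h]
      have hstep : (pref ++ fmtB_body cur) ++ w ++ [' '] = pref ++ fmtB_body (cur ++ [w]) := by
        rw [fmtB_body_append_singleton]; simp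
      rw [hstep, ih (cur ++ [w]) total pref]
      have hlen : pref.length + (fmtB_body (cur ++ [w])).length
          = pref.length + (fmtB_body cur).length + w.length + 1 := by
        rw [fmtB_body_append_singleton]; simp; omega
      rw [hlen]

-- ===== VERDICT (by name: the statement is the Claim_ definition above) =====
theorem format_less_than_85_characters_spec : Claim_equal_format_less_than_85_characters := by
  intro line indent _
  unfold Spec_format_less_than_85_characters
  unfold format_less_than_85_characters format_less_than_85_characters_alt
  have h := fmtAB_main indent.toList (PySem.Chars.splitOn line.toList [' ']) [] [] indent.toList
  simp [fmtB_body] at h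
  rw [show indent.toList.length = indent.length from by exact String.length_toList ▸ rfl]
  rw [h]
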